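-- pv_equiv track=rewrite | github.com/Potato0705/Edu | scripts/run_anchor_budget_experiment.py | _band_quota
-- ===== SOURCE A (Python) =====
-- from typing import Any, Dict, Iterable, List, Optional, Sequence, Tuple
--
-- def _band_quota(k: int, available_bands: Sequence[str]) -> Dict[str, int]:
--     bands = [b for b in ["low", "mid", "high"] if b in set(available_bands)]
--     if not bands or k <= 0:
--         return {}
--     base = k // len(bands)
--     rem = k % len(bands)
--     quotas = {band: base for band in bands}
--     for band in bands[:rem]:
--         quotas[band] += 1
--     return quotas
-- ===== SOURCE B (Python) =====
-- def _band_quota(k, available_bands):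
--     avail = set(available_bands)
--     bands = [b for b in ["low", "mid", "high"] if b in avail]
--     if not bands or k <= 0:
--         return {}
--     return _deal(bands, k)
--
--
-- def _deal(bands, k):
--     # Give the first band its fair (ceiling) share, then recursively split
--     # the remainder among the remaining bands.
--     if not bands:
--         return {}
--     share = -((-k) // len(bands))  # ceil(k / len(bands))
--     quotas = {bands[0]: share}
--     quotas.update(_deal(bands[1:], k - share))
--     return quotas
-- ===== Notes on version B (the rewrite author's own statement) =====
-- stated objective: alternative
-- what changed: Replaces A's base/remainder arithmetic with dict pre-fill and increment loop by a recursive fair-division (peel off the ceiling share ceil(k/n) for the first band, recurse on the remainder over the remaining bands), and builds the membership set once instead of once per candidate band.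
import Mathlib
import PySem

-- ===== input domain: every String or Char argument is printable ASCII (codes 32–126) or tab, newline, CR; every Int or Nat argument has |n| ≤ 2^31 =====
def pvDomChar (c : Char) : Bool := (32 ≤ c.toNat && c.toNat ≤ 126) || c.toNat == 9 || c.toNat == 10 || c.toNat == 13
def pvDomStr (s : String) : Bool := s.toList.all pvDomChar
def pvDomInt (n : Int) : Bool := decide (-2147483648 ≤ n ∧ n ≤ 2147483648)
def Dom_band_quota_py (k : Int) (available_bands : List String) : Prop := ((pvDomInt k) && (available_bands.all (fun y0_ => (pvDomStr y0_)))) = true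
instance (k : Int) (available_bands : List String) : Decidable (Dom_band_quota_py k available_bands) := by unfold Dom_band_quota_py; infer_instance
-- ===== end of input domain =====

-- B replaces A's base/remainder arithmetic (dict pre-fill plus increment loop over
-- bands[:rem]) by a recursive fair division: peel off the ceiling share ceil(k/n)
-- for the first band and recurse on the remainder; objective: alternative.

-- ===== PORT A =====
def band_quota_py (k : Int) (available_bands : List String) : List (String × Int) :=
  let bands := ["low", "mid", "high"].filter
    (fun b => PySem.Set.contains (PySem.Set.ofList available_bands) b)
  if bands = [] ∨ k ≤ 0 then []
  else
    let base := PySem.Int.floordiv k bands.length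
    let rem := PySem.Int.mod k bands.length
    let quotas := bands.foldl (fun d b => d.insert b base)
      (PySem.Dict.empty (κ := String) (ν := Int))
    -- quotas[band] += 1 for band in bands[:rem]; the key is always present,
    -- so Dict.modify with default 0 is exact here
    let quotas := (PySem.List.slice bands none (some rem)).foldl
      (fun d b => d.modify b 0 (· + 1)) quotas
    quotas.items

-- ===== PORT B =====
-- _deal: {bands[0]: share} updated with the recursive dict; the recursive keys are
-- the (distinct) remaining bands, so the items list is exactly this cons.
def pvDeal : List String → Int → List (String × Int)
  | [], _ => []
  | b :: rest, k =>
    let share := -(PySem.Int.floordiv (-k) ((b :: rest).length))  -- ceil(k/len(bands))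
    (b, share) :: pvDeal rest (k - share)

def band_quota_py_alt (k : Int) (available_bands : List String) : List (String × Int) :=
  let avail := PySem.Set.ofList available_bands
  let bands := ["low", "mid", "high"].filter (fun b => PySem.Set.contains avail b)
  if bands = [] ∨ k ≤ 0 then []
  else pvDeal bands k

-- ===== PRECONDITION & SPEC =====
def Spec_band_quota_py (k : Int) (available_bands : List String) (out : List (String × Int)) : Prop := out = band_quota_py_alt k available_bands
instance (k : Int) (available_bands : List String) (out : List (String × Int)) : Decidable (Spec_band_quota_py k available_bands out) := by unfold Spec_band_quota_py; infer_instance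

-- ===== CLAIM (what is proved, stated in full; the proofs are below) =====
def Claim_equal_band_quota_py : Prop := ∀ (k : Int) (available_bands : List String), Dom_band_quota_py k available_bands → Spec_band_quota_py k available_bands (band_quota_py k available_bands)

-- ===== LEMMAS AND PROOFS =====

-- ===== VERDICT (by name: the statement is the Claim_ definition above) =====
theorem band_quota_py_spec : Claim_equal_band_quota_py := by
  intro k ab _
  unfold Spec_band_quota_py band_quota_py band_quota_py_alt
  cases hl : PySem.Set.contains (PySem.Set.ofList ab) "low" <;>
  cases hm : PySem.Set.contains (PySem.Set.ofList ab) "mid" <;>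
  cases hh : PySem.Set.contains (PySem.Set.ofList ab) "high" <;>
  by_cases hk : k ≤ 0 <;>
  simp only [List.filter_cons, List.filter_nil, hl, hm, hh, if_true, hk] <;>
  simp <;>
  rw [pvDeal] <;>
  first
    | (simp [pvDeal, PySem.List.slice, PySem.List.clampIdx, PySem.Dict.insert,
         PySem.Dict.modify, PySem.Dict.empty, PySem.Dict.getD, PySem.Dict.get?] <;> omega)
    | (have hr : k % 2 = 0 ∨ k % 2 = 1 := by omega
       rcases hr with hr | hr <;> rw [hr] <;>
       simp [pvDeal, PySem.List.slice, PySem.List.clampIdx, PySem.Dict.insert,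
         PySem.Dict.modify, PySem.Dict.empty, PySem.Dict.getD, PySem.Dict.get?,
         PySem.Int.floordiv_eq_ediv_of_pos (show (0:Int) < 2 by norm_num)] <;> omega)
    | (have hr : k % 3 = 0 ∨ k % 3 = 1 ∨ k % 3 = 2 := by omega
       rcases hr with hr | hr | hr <;> rw [hr] <;>
       simp [pvDeal, PySem.List.slice, PySem.List.clampIdx, PySem.Dict.insert,
         PySem.Dict.modify, PySem.Dict.empty, PySem.Dict.getD, PySem.Dict.get?,
         PySem.Int.floordiv_eq_ediv_of_pos (show (0:Int) < 2 by norm_num),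
         PySem.Int.floordiv_eq_ediv_of_pos (show (0:Int) < 3 by norm_num)] <;> omega)
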